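-- pv_equiv track=rewrite | github.com/Brandtweary/Cymbiont | src/text_parser.py | combine_postscripts
-- ===== SOURCE A (Python) =====
-- from typing import List, Optional
--
-- def is_postscript(text: str) -> bool:
--     """Determine if a paragraph is a postscript based on length and ending."""
--     text = text.strip()
--     return len(text.split()) < 20 and text.endswith('.')
--
-- def combine_postscripts(paragraphs: List[str]) -> List[str]:
--     """Combine postscript paragraphs with their preceding paragraphs."""
--     result: List[str] = []
--     ps_buffer: List[str] = []
--
--     for para in paragraphs:
--         if is_postscript(para):
--             ps_buffer.append(para)
--         else:
--             # If we have postscripts but no preceding paragraph, add them as separate paragraphs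
--             if ps_buffer and not result:
--                 result.extend(ps_buffer)
--                 ps_buffer.clear()
--
--             if result and ps_buffer:
--                 # Combine all accumulated postscripts with the previous paragraph
--                 result[-1] = '\n'.join([result[-1]] + ps_buffer)
--                 ps_buffer.clear()
--             result.append(para)
--
--     # Handle any remaining postscripts at the end
--     if ps_buffer:
--         if result:
--             result[-1] = '\n'.join([result[-1]] + ps_buffer)
--         else:
--             # If we only had postscripts, add them as separate paragraphs
--             result.extend(ps_buffer)
--
--     return result
-- ===== SOURCE B (Python) =====
-- from typing import List
--
-- def is_postscript(text: str) -> bool: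
--     """Determine if a paragraph is a postscript based on length and ending."""
--     text = text.strip()
--     return len(text.split()) < 20 and text.endswith('.')
--
-- def combine_postscripts(paragraphs: List[str]) -> List[str]:
--     """Combine postscript paragraphs with their preceding paragraphs.
--
--     Single pass, no buffer: once a non-postscript paragraph has been seen,
--     every postscript is folded into the last result entry immediately;
--     before that, postscripts stay separate."""
--     result: List[str] = []
--     seen_normal = False
--     for para in paragraphs:
--         if not is_postscript(para):
--             result.append(para)
--             seen_normal = True
--         elif seen_normal:
--             result[-1] = '\n'.join([result[-1], para])
--         else:
--             result.append(para)
--     return result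
-- ===== Notes on version B (the rewrite author's own statement) =====
-- stated objective: simpler
-- what changed: Replaced A's postscript buffer list and its three separate flush sites (leading flush, mid-loop merge, end-of-loop flush) with a single boolean seen_normal flag and immediate per-paragraph merging into result[-1], so no deferred state survives the loop.
import Mathlib
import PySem

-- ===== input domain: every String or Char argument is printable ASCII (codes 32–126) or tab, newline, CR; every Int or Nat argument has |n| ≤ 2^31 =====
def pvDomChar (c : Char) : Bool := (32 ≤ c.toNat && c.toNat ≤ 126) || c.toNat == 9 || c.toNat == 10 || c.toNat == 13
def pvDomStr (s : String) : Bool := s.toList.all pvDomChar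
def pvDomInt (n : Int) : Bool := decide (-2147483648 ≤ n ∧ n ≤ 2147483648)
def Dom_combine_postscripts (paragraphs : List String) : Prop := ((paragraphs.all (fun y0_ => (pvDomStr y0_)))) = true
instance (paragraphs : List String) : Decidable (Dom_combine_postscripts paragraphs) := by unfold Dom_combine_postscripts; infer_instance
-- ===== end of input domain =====

-- B is a simpler decomposition of the same pass: the postscript buffer and its three flush sites
-- are replaced by a boolean flag and immediate merging into the last result entry.

-- ===== PORT A =====
-- helper is_postscript, shared verbatim by both Python files
def is_postscript (text : String) : Bool :=
  let t := PySem.Str.strip text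
  decide ((PySem.Str.split₀ t).length < 20) && PySem.Str.endswith t "."

-- one iteration of A's for-loop over state (result, ps_buffer)
def cpsStepA (st : List String × List String) (para : String) : List String × List String :=
  if is_postscript para then (st.1, st.2 ++ [para])
  else
    -- leading postscripts with no preceding paragraph become separate entries
    let st1 := if st.2 ≠ [] ∧ st.1 = [] then (st.1 ++ st.2, ([] : List String)) else st
    -- combine accumulated postscripts into result[-1]
    let st2 :=
      if st1.1 ≠ [] ∧ st1.2 ≠ [] then
        (st1.1.dropLast ++ [PySem.Str.join "\n" (st1.1.getLastD "" :: st1.2)], ([] : List String))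
      else st1
    (st2.1 ++ [para], st2.2)

def combine_postscripts (paragraphs : List String) : List String :=
  let st := paragraphs.foldl cpsStepA ([], [])
  -- handle any remaining postscripts at the end
  if st.2 ≠ [] then
    if st.1 ≠ [] then st.1.dropLast ++ [PySem.Str.join "\n" (st.1.getLastD "" :: st.2)]
    else st.1 ++ st.2
  else st.1

-- ===== PORT B =====
-- one iteration of B's loop over state (result, seen_normal)
def cpsStepB (st : List String × Bool) (para : String) : List String × Bool :=
  if ¬ is_postscript para then (st.1 ++ [para], true)
  else if st.2 then (st.1.dropLast ++ [PySem.Str.join "\n" [st.1.getLastD "", para]], st.2)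
  else (st.1 ++ [para], st.2)

def combine_postscripts_alt (paragraphs : List String) : List String :=
  (paragraphs.foldl cpsStepB ([], false)).1

-- ===== PRECONDITION & SPEC =====
def Spec_combine_postscripts (paragraphs : List String) (out : List String) : Prop := out = combine_postscripts_alt paragraphs
instance (paragraphs : List String) (out : List String) : Decidable (Spec_combine_postscripts paragraphs out) := by unfold Spec_combine_postscripts; infer_instance

-- ===== CLAIM (what is proved, stated in full; the proofs are below) =====
def Claim_equal_combine_postscripts : Prop := ∀ (paragraphs : List String), Dom_combine_postscripts paragraphs → Spec_combine_postscripts paragraphs (combine_postscripts paragraphs)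

-- ===== LEMMAS AND PROOFS =====

-- A's final flush of the remaining buffer
def cpsFlush (st : List String × List String) : List String :=
  if st.2 ≠ [] then
    if st.1 ≠ [] then st.1.dropLast ++ [PySem.Str.join "\n" (st.1.getLastD "" :: st.2)]
    else st.1 ++ st.2
  else st.1

-- B-side view of A's state once a normal paragraph has been seen
def cpsMerge (res buf : List String) : List String :=
  if buf = [] then res
  else res.dropLast ++ [PySem.Str.join "\n" (res.getLastD "" :: buf)]

theorem cps_interc_cons_cons (sep a b : List Char) (t : List (List Char)) :
    List.intercalate sep (a :: b :: t) = a ++ sep ++ List.intercalate sep (b :: t) := by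
  simp [List.intercalate]

theorem cps_interc_snoc (sep y : List Char) (xs : List (List Char)) (hxs : xs ≠ []) :
    List.intercalate sep (xs ++ [y]) = List.intercalate sep xs ++ sep ++ y := by
  induction xs with
  | nil => cases hxs rfl
  | cons a t ih =>
    cases t with
    | nil => simp [List.intercalate]
    | cons b r =>
      have h := ih (by simp)
      simp only [List.cons_append] at h ⊢
      rw [cps_interc_cons_cons, cps_interc_cons_cons, h]
      simp

theorem cps_join_snoc (xs : List String) (y : String) (hxs : xs ≠ []) :
    PySem.Str.join "\n" (xs ++ [y]) = PySem.Str.join "\n" [PySem.Str.join "\n" xs, y] := by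
  simp only [PySem.Str.join, PySem.Chars.join, String.toList_ofList, List.map_append,
    List.map_cons, List.map_nil]
  congr 1
  rw [cps_interc_snoc _ _ _ (by simpa using hxs), cps_interc_cons_cons]
  simp [List.intercalate]

theorem cps_merge_snoc (res buf : List String) (p : String) (_hres : res ≠ []) :
    cpsMerge res (buf ++ [p]) =
      (cpsMerge res buf).dropLast ++
        [PySem.Str.join "\n" [(cpsMerge res buf).getLastD "", p]] := by
  cases buf with
  | nil => simp [cpsMerge]
  | cons b buf =>
    simp only [cpsMerge, List.cons_append, if_neg, List.cons_ne_nil, not_false_eq_true,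
      List.dropLast_concat, List.getLastD_concat]
    rw [show res.getLastD "" :: b :: (buf ++ [p]) = (res.getLastD "" :: b :: buf) ++ [p] by simp,
      cps_join_snoc _ _ (by simp)]

theorem cps_seen_phase (rest : List String) (res buf : List String) (hres : res ≠ []) :
    cpsFlush (rest.foldl cpsStepA (res, buf)) =
      (rest.foldl cpsStepB (cpsMerge res buf, true)).1 := by
  induction rest generalizing res buf with
  | nil =>
    simp only [List.foldl_nil, cpsFlush, cpsMerge]
    by_cases h : buf = [] <;> simp [h, hres]
  | cons p rest ih =>
    simp only [List.foldl_cons]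
    by_cases hp : is_postscript p
    · rw [show cpsStepA (res, buf) p = (res, buf ++ [p]) by simp [cpsStepA, hp],
        show cpsStepB (cpsMerge res buf, true) p
            = (cpsMerge res (buf ++ [p]), true) by
          simp [cpsStepB, hp, cps_merge_snoc res buf p hres]]
      exact ih res (buf ++ [p]) hres
    · rw [show cpsStepA (res, buf) p = (cpsMerge res buf ++ [p], []) by
          by_cases hb : buf = [] <;> simp [cpsStepA, hp, hres, hb, cpsMerge],
        show cpsStepB (cpsMerge res buf, true) p = (cpsMerge res buf ++ [p], true) by
          simp [cpsStepB, hp]]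
      rw [ih (cpsMerge res buf ++ [p]) [] (by simp)]
      simp [cpsMerge]

theorem cps_lead_phase (rest : List String) (buf : List String) :
    cpsFlush (rest.foldl cpsStepA ([], buf)) = (rest.foldl cpsStepB (buf, false)).1 := by
  induction rest generalizing buf with
  | nil => simp only [List.foldl_nil, cpsFlush]; by_cases h : buf = [] <;> simp [h]
  | cons p rest ih =>
    simp only [List.foldl_cons]
    by_cases hp : is_postscript p
    · rw [show cpsStepA ([], buf) p = ([], buf ++ [p]) by simp [cpsStepA, hp],
        show cpsStepB (buf, false) p = (buf ++ [p], false) by simp [cpsStepB, hp]]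
      exact ih (buf ++ [p])
    · rw [show cpsStepA ([], buf) p = (buf ++ [p], []) by
          by_cases hb : buf = [] <;> simp [cpsStepA, hp, hb],
        show cpsStepB (buf, false) p = (buf ++ [p], true) by simp [cpsStepB, hp]]
      rw [cps_seen_phase rest (buf ++ [p]) [] (by simp)]
      simp [cpsMerge]

-- ===== VERDICT (by name: the statement is the Claim_ definition above) =====
theorem combine_postscripts_spec : Claim_equal_combine_postscripts := by
  intro paragraphs _
  unfold Spec_combine_postscripts combine_postscripts combine_postscripts_alt
  have := cps_lead_phase paragraphs []
  simpa [cpsFlush] using this
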